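-- pv_equiv track=rewrite | github.com/dhetting/sabench | scripts/fix_noncomm_grid_cell4.py | to_source
-- ===== SOURCE A (Python) =====
-- def to_source(code):
--     lines = code.split("\n")
--     result = []
--     for i, line in enumerate(lines):
--         if i < len(lines) - 1:
--             result.append(line + "\n")
--         else:
--             if line:
--                 result.append(line)
--     return result
-- ===== SOURCE B (Python) =====
-- def to_source(code):
--     result = []
--     rest = code
--     while True:
--         idx = rest.find("\n")
--         if idx == -1:
--             if rest:
--                 result.append(rest)
--             return result
--         result.append(rest[:idx + 1])
--         rest = rest[idx + 1:]
-- ===== Notes on version B (the rewrite author's own statement) =====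
-- stated objective: alternative
-- what changed: Replaces splitting on newline plus an enumerate loop that compares each index against len(lines)-1 with a scan that repeatedly find()s the next newline and slices off one newline-terminated segment, never building the split list or using indices.
import Mathlib
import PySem

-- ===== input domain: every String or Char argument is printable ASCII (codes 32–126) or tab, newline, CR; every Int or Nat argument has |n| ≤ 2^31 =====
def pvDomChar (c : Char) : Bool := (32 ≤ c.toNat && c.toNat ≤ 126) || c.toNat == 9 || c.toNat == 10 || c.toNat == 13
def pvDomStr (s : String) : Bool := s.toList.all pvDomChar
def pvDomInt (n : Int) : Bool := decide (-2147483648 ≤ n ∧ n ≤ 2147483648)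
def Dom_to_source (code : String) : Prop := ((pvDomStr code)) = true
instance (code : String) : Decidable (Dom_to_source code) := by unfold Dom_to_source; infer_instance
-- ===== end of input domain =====

-- B replaces splitting on newline plus an enumerate loop comparing indices against len-1 with a
-- find-and-slice scan over the remaining string; alternative decomposition, same values.

-- ===== PORT A =====
def to_source (code : String) : List String :=
  let lines := PySem.Chars.splitOn code.toList ['\n']
  ((PySem.List.enumerate lines).foldl
    (fun result p =>
      if p.1 < (lines.length : Int) - 1 then result ++ [p.2 ++ ['\n']]
      else if p.2 ≠ [] then result ++ [p.2] else result) []).map String.ofList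

-- ===== PORT B =====
-- the while-loop of Source B: find the next newline in the remainder, slice off that segment
def altGo (rest : List Char) (result : List (List Char)) : List (List Char) :=
  let idx := PySem.Chars.find rest ['\n']
  if idx = -1 then
    if rest ≠ [] then result ++ [rest] else result
  else
    altGo (rest.drop (idx.toNat + 1)) (result ++ [rest.take (idx.toNat + 1)])
termination_by rest.length
decreasing_by
  have hinf : ['\n'] <:+: rest := by
    by_contra hc
    exact ‹¬ idx = -1› ((PySem.Chars.find_eq_neg_one_iff rest ['\n']).mpr hc)
  have h1 : 1 ≤ rest.length := hinf.length_le
  simp [List.length_drop]; omega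

def to_source_alt (code : String) : List String :=
  (altGo code.toList []).map String.ofList

-- ===== PRECONDITION & SPEC =====
def Spec_to_source (code : String) (out : List String) : Prop := out = to_source_alt code
instance (code : String) (out : List String) : Decidable (Spec_to_source code out) := by unfold Spec_to_source; infer_instance

-- ===== CLAIM (what is proved, stated in full; the proofs are below) =====
def Claim_equal_to_source : Prop := ∀ (code : String), Dom_to_source code → Spec_to_source code (to_source code)

-- ===== LEMMAS AND PROOFS =====

-- split of a char list on '\n' keeping empty pieces (proof-side model of code.split("\n"))
def splitNl : List Char → List (List Char)
  | [] => [[]]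
  | c :: rest =>
    if c = '\n' then [] :: splitNl rest
    else
      match splitNl rest with
      | [] => [[c]]
      | h :: t => (c :: h) :: t

-- the common result: newline-terminated segments, a trailing non-empty remainder kept
def segs : List Char → List (List Char)
  | [] => []
  | c :: rest =>
    if c = '\n' then ['\n'] :: segs rest
    else
      match segs rest with
      | [] => [[c]]
      | h :: t => (c :: h) :: t

-- what A's loop does to the split pieces
def glue : List (List Char) → List (List Char)
  | [] => []
  | [l] => if l = [] then [] else [l]
  | l :: ls => (l ++ ['\n']) :: glue ls

def mapHead (f : List Char → List Char) : List (List Char) → List (List Char)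
  | [] => []
  | h :: t => f h :: t

theorem splitNl_ne_nil (cs : List Char) : splitNl cs ≠ [] := by
  cases cs with
  | nil => simp [splitNl]
  | cons c rest =>
    simp only [splitNl]
    split
    · simp
    · split <;> simp

theorem splitOn_go_eq (fuel : Nat) : ∀ (l cur : List Char) (accs : List (List Char)),
    l.length < fuel →
    PySem.Chars.splitOn.go ['\n'] fuel l cur accs
      = accs.reverse ++ mapHead (cur.reverse ++ ·) (splitNl l) := by
  induction fuel with
  | zero => intro l cur accs h; omega
  | succ fuel ih =>
    intro l cur accs h
    cases l with
    | nil => simp [PySem.Chars.splitOn.go, splitNl, mapHead]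
    | cons c rest =>
      rw [PySem.Chars.splitOn.go]
      by_cases hc : c = '\n'
      · subst hc
        simp only [List.isPrefixOf, beq_self_eq_true, Bool.and_eq_true]
        rw [if_pos (And.intro trivial trivial)]
        rw [show List.drop ['\n'].length ('\n' :: rest) = rest from by simp]
        rw [ih rest [] _ (by simpa using h)]
        simp only [splitNl, mapHead, List.reverse_nil, List.nil_append, List.reverse_cons]
        cases hs : splitNl rest with
        | nil => exact absurd hs (splitNl_ne_nil rest)
        | cons x xs => simp
      · have hp : ¬ (['\n'].isPrefixOf (c :: rest) = true) := by
          simp [List.isPrefixOf]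
          exact fun hh => absurd hh.symm hc
        rw [if_neg hp, ih rest (c :: cur) accs (by simpa using h)]
        rw [splitNl, if_neg hc]
        cases hs : splitNl rest with
        | nil => exact absurd hs (splitNl_ne_nil rest)
        | cons x xs => simp [mapHead]

theorem splitOn_eq_splitNl (cs : List Char) :
    PySem.Chars.splitOn cs ['\n'] = splitNl cs := by
  rw [PySem.Chars.splitOn, splitOn_go_eq (cs.length + 1) cs [] [] (by omega)]
  cases hs : splitNl cs with
  | nil => exact absurd hs (splitNl_ne_nil cs)
  | cons x xs => simp [mapHead]

theorem segs_of_no_nl (cs : List Char) (h : '\n' ∉ cs) :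
    segs cs = if cs = [] then [] else [cs] := by
  induction cs with
  | nil => simp [segs]
  | cons c rest ih =>
    simp only [List.mem_cons, not_or] at h
    have hc : c ≠ '\n' := fun hc => h.1 hc.symm
    rw [segs, if_neg hc, ih h.2]
    by_cases hr : rest = [] <;> simp [hr]

theorem glue_splitNl (cs : List Char) : glue (splitNl cs) = segs cs := by
  induction cs with
  | nil => simp [splitNl, segs, glue]
  | cons c rest ih =>
    by_cases hc : c = '\n'
    · subst hc
      rw [splitNl, if_pos rfl, segs, if_pos rfl, ← ih]
      cases h : splitNl rest with
      | nil => exact absurd h (splitNl_ne_nil rest)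
      | cons x xs => simp [glue]
    · rw [splitNl, if_neg hc, segs, if_neg hc, ← ih]
      cases h : splitNl rest with
      | nil => exact absurd h (splitNl_ne_nil rest)
      | cons x xs =>
        cases xs with
        | nil =>
          simp only [glue]
          by_cases hx : x = [] <;> simp [hx]
        | cons y ys => simp [glue]

theorem segs_split (j : Nat) (cs : List Char) (hj : j < cs.length)
    (hnl : cs[j] = '\n') (hfirst : ∀ i, (hi : i < j) → cs[i]'(by omega) ≠ '\n') :
    segs cs = cs.take (j + 1) :: segs (cs.drop (j + 1)) := by
  induction j generalizing cs with
  | zero =>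
    cases cs with
    | nil => simp at hj
    | cons c rest =>
      simp at hnl
      subst hnl
      simp [segs]
  | succ j ih =>
    cases cs with
    | nil => simp at hj
    | cons c rest =>
      have hc : c ≠ '\n' := hfirst 0 (by omega)
      have hrest := ih rest (by simpa using hj) (by simpa using hnl)
        (fun i hi => by simpa using hfirst (i+1) (by omega))
      rw [segs, if_neg hc, hrest]
      simp

theorem prefix_nl_iff (cs : List Char) (i : Nat) (hi : i < cs.length) :
    ['\n'] <+: cs.drop i ↔ cs[i] = '\n' := by
  rw [List.drop_eq_getElem_cons hi]
  constructor
  · intro hp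
    exact ((List.cons_prefix_cons.mp hp).1).symm
  · intro he
    rw [he]
    exact List.cons_prefix_cons.mpr ⟨rfl, List.nil_prefix⟩

theorem altGo_eq (rest : List Char) (result : List (List Char)) :
    altGo rest result = result ++ segs rest := by
  rw [altGo]
  by_cases h : PySem.Chars.find rest ['\n'] = -1
  · simp only [h]
    have hnot : '\n' ∉ rest := by
      intro hm
      exact ((PySem.Chars.find_eq_neg_one_iff rest ['\n']).mp h)
        ((List.singleton_infix_iff '\n' rest).mpr hm)
    rw [segs_of_no_nl rest hnot]
    by_cases hr : rest = [] <;> simp [hr]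
  · rw [if_neg h]
    have hspec := PySem.Chars.findFrom_natCast_spec rest ['\n'] 0 (by simp)
      (by rw [show ((0:Nat):Int) = 0 from rfl, PySem.Chars.findFrom_zero]; exact h)
    rw [show ((0:Nat):Int) = 0 from rfl, PySem.Chars.findFrom_zero] at hspec
    obtain ⟨h0, hpre, hmin⟩ := hspec
    set j := (PySem.Chars.find rest ['\n']).toNat with hj
    have hjlt : j < rest.length := by
      by_contra hge
      rw [List.drop_eq_nil_of_le (Nat.le_of_not_lt hge)] at hpre
      simp at hpre
    have hnl : rest[j] = '\n' := (prefix_nl_iff rest j hjlt).mp hpre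
    have hfirst : ∀ i, (hi : i < j) → rest[i]'(by omega) ≠ '\n' := by
      intro i hi hcon
      exact hmin i (by omega) hi ((prefix_nl_iff rest i (by omega)).mpr hcon)
    rw [altGo_eq (rest.drop (j + 1)) (result ++ [rest.take (j + 1)]),
        segs_split j rest hjlt hnl hfirst]
    simp
termination_by rest.length
decreasing_by
  simp [List.length_drop]
  omega

theorem foldA (n : Int) (ls : List (List Char)) (k : Int) (acc : List (List Char))
    (hk : k + ls.length = n) (hne : ls ≠ []) :
    (PySem.List.enumerate ls k).foldl
      (fun result p =>
        if p.1 < n - 1 then result ++ [p.2 ++ ['\n']]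
        else if p.2 ≠ [] then result ++ [p.2] else result) acc
    = acc ++ glue ls := by
  induction ls generalizing k acc with
  | nil => exact absurd rfl hne
  | cons x xs ih =>
    cases xs with
    | nil =>
      have hk' : k = n - 1 := by simp at hk; omega
      simp only [PySem.List.enumerate, List.foldl]
      rw [if_neg (by omega)]
      by_cases hx : x = [] <;> simp [hx, glue]
    | cons y ys =>
      have hlt : k < n - 1 := by simp at hk; omega
      rw [show PySem.List.enumerate (x :: y :: ys) k
            = (k, x) :: PySem.List.enumerate (y :: ys) (k + 1) from rfl,
          List.foldl_cons]
      rw [if_pos hlt]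
      rw [ih (k + 1) (acc ++ [x ++ ['\n']]) (by simp at hk ⊢; omega) (by simp)]
      rw [show glue (x :: y :: ys) = (x ++ ['\n']) :: glue (y :: ys) from rfl]
      simp

-- ===== VERDICT (by name: the statement is the Claim_ definition above) =====
theorem to_source_spec : Claim_equal_to_source := by
  intro code _
  unfold Spec_to_source to_source to_source_alt
  simp only [splitOn_eq_splitNl, altGo_eq, List.nil_append]
  rw [foldA ((splitNl code.toList).length : Int) (splitNl code.toList) 0 [] (by simp)
        (splitNl_ne_nil _),
      glue_splitNl]
  simp
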